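-- pv_equiv track=rewrite | github.com/migzeetigglez/thigglez_hyprland_desktop | dotfiles/eww/.config/eww/mako_notifications.py | parse
-- ===== SOURCE A (Python) =====
-- def parse(output):
--     entries = []
--     current = None
--     if not output:
--         return entries
--
--     for line in output.splitlines():
--         if line.startswith("Notification "):
--             if current:
--                 entries.append(current)
--             header = line[len("Notification "):]
--             if ": " in header:
--                 ident, summary = header.split(": ", 1)
--             else:
--                 ident, summary = header, ""
--             current = {
--                 "id": ident.strip(),
--                 "summary": summary.strip() or "(no title)",
--                 "app": "",
--                 "urgency": "normal",
--             }
--             continue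
--
--         if current is None:
--             continue
--
--         if line.startswith("  Desktop entry:"):
--             current["app"] = line.split(":", 1)[1].strip()
--         elif line.startswith("  Urgency:"):
--             current["urgency"] = line.split(":", 1)[1].strip()
--         elif line.startswith("  App:"):
--             current["app"] = line.split(":", 1)[1].strip()
--
--     if current:
--         entries.append(current)
--     return entries
-- ===== SOURCE B (Python) =====
-- def _parse_block(block):
--     header = block[0][len("Notification "):]
--     if ": " in header:
--         ident, summary = header.split(": ", 1)
--     else:
--         ident, summary = header, ""
--     app = ""
--     urgency = "normal"
--     for line in block[1:]:
--         if line.startswith("  Desktop entry:") or line.startswith("  App:"):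
--             app = line.split(":", 1)[1].strip()
--         elif line.startswith("  Urgency:"):
--             urgency = line.split(":", 1)[1].strip()
--     return {
--         "id": ident.strip(),
--         "summary": summary.strip() or "(no title)",
--         "app": app,
--         "urgency": urgency,
--     }
--
--
-- def parse(output):
--     blocks = []
--     for line in output.splitlines():
--         if line.startswith("Notification "):
--             blocks.append([line])
--         elif blocks:
--             blocks[-1].append(line)
--     return [_parse_block(b) for b in blocks]
-- ===== Notes on version B (the rewrite author's own statement) =====
-- stated objective: alternative
-- what changed: A is a single stateful pass that mutates an in-progress dict and flushes it into the result list; B first groups the lines into notification blocks and then maps a pure per-block parser that accumulates the app/urgency fields in two plain variables and builds each dict once at the end.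
import Mathlib
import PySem

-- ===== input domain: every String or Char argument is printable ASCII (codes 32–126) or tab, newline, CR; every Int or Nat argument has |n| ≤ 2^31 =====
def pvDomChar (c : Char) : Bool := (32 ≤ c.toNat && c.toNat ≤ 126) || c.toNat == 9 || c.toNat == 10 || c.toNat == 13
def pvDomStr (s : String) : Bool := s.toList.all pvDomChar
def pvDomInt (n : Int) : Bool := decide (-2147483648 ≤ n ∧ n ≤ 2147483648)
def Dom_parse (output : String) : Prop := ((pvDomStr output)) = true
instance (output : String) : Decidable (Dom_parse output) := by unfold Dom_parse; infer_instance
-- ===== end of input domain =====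

-- B re-packages the same parsing as a two-phase decomposition (group lines into blocks, then map a
-- pure per-block parser with a pair accumulator instead of A's incremental dict mutation): 'alternative',
-- not claimed faster.

-- Helpers shared by both ports because the SAME Python expressions occur verbatim in Source A and Source B:
-- `line.split(":", 1)[1].strip()` and the `": " in header` / `header.split(": ", 1)` branch.
-- `line.split(":",1)[1]`: every call site follows a startswith test whose prefix contains ':',
-- so index 1 exists; `.getD 1 []` is exact there.
def pvAfterColon (l : List Char) : String :=
  String.mk (PySem.Chars.strip ((PySem.Chars.splitOnMax l [':'] 1).getD 1 []))

def pvHeaderSplit (header : List Char) : List Char × List Char :=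
  if PySem.Chars.isIn ": ".toList header then
    let parts := PySem.Chars.splitOnMax header ": ".toList 1
    (parts.getD 0 [], parts.getD 1 [])
  else (header, [])

-- `ident.strip()` and `summary.strip() or "(no title)"` (empty string is falsy)
def pvIdOf (ident : List Char) : String := String.mk (PySem.Chars.strip ident)
def pvSummaryOf (summary : List Char) : String :=
  let s := String.mk (PySem.Chars.strip summary)
  if s = "" then "(no title)" else s

-- ===== PORT A =====
-- the dict literal `current = {...}` built from the header line (line[len("Notification "):] = line[13:])
def pvInitA (l : List Char) : PySem.Dict String String :=
  let hs := pvHeaderSplit (PySem.Chars.slice l (some 13) none)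
  PySem.Dict.ofList
    [("id", pvIdOf hs.1), ("summary", pvSummaryOf hs.2), ("app", ""), ("urgency", "normal")]

-- the three elif branches mutating `current`
def pvUpdA (d : PySem.Dict String String) (l : List Char) : PySem.Dict String String :=
  if PySem.Chars.startswith l "  Desktop entry:".toList then d.insert "app" (pvAfterColon l)
  else if PySem.Chars.startswith l "  Urgency:".toList then d.insert "urgency" (pvAfterColon l)
  else if PySem.Chars.startswith l "  App:".toList then d.insert "app" (pvAfterColon l)
  else d

-- the loop body: state = (entries, current)
def pvStepA (st : List (PySem.Dict String String) × Option (PySem.Dict String String))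
    (l : List Char) : List (PySem.Dict String String) × Option (PySem.Dict String String) :=
  if PySem.Chars.startswith l "Notification ".toList then
    (st.1 ++ st.2.elim [] (fun c => [c]), some (pvInitA l))
  else
    match st.2 with
    | none => st
    | some c => (st.1, some (pvUpdA c l))

def parse (output : String) : List (List (String × String)) :=
  if output = "" then []
  else
    let st := (PySem.Chars.splitlines output.toList).foldl pvStepA ([], none)
    ((st.1 ++ st.2.elim [] (fun c => [c])).map PySem.Dict.items)

-- ===== PORT B =====
-- phase 1: group lines into blocks (a new block at each "Notification " line; pre-header lines dropped)
def pvAddLine (bs : List (List (List Char))) (l : List Char) : List (List (List Char)) :=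
  if PySem.Chars.startswith l "Notification ".toList then bs ++ [[l]]
  else
    match bs.getLast? with
    | none => bs
    | some b => bs.dropLast ++ [b ++ [l]]

-- phase 2: _parse_block's field loop, two plain accumulators (app, urgency)
def pvFieldStep (s : String × String) (l : List Char) : String × String :=
  if PySem.Chars.startswith l "  Desktop entry:".toList
      || PySem.Chars.startswith l "  App:".toList then (pvAfterColon l, s.2)
  else if PySem.Chars.startswith l "  Urgency:".toList then (s.1, pvAfterColon l)
  else s

-- _parse_block: block[0] exists at every call site (blocks are built nonempty), so headD [] is exact
def pvParseBlock (b : List (List Char)) : List (String × String) :=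
  let hs := pvHeaderSplit (PySem.Chars.slice (b.headD []) (some 13) none)
  let fs := (b.drop 1).foldl pvFieldStep ("", "normal")
  [("id", pvIdOf hs.1), ("summary", pvSummaryOf hs.2), ("app", fs.1), ("urgency", fs.2)]

def parse_alt (output : String) : List (List (String × String)) :=
  ((PySem.Chars.splitlines output.toList).foldl pvAddLine []).map pvParseBlock

-- ===== PRECONDITION & SPEC =====
def Spec_parse (output : String) (out : List (List (String × String))) : Prop := out = parse_alt output
instance (output : String) (out : List (List (String × String))) : Decidable (Spec_parse output out) := by unfold Spec_parse; infer_instance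

-- ===== CLAIM (what is proved, stated in full; the proofs are below) =====
def Claim_equal_parse : Prop := ∀ (output : String), Dom_parse output → Spec_parse output (parse output)

-- ===== LEMMAS AND PROOFS =====

-- A's `current` after processing one whole block: init from the head line, fold the field lines
def pvCur (b : List (List Char)) : PySem.Dict String String :=
  (b.drop 1).foldl pvUpdA (pvInitA (b.headD []))

-- A's state corresponding to B's list of blocks
def pvStateOf (bs : List (List (List Char))) :
    List (PySem.Dict String String) × Option (PySem.Dict String String) :=
  (bs.dropLast.map pvCur, bs.getLast?.map pvCur)

-- A's post-loop finish: append current, map dicts to item lists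
def pvFinish (st : List (PySem.Dict String String) × Option (PySem.Dict String String)) :
    List (List (String × String)) :=
  (st.1 ++ st.2.elim [] (fun c => [c])).map PySem.Dict.items

lemma pvPrefix_exclusive {l p q : List Char} (hp : PySem.Chars.startswith l p = true)
    (hq : PySem.Chars.startswith l q = true) (hlen : p.length ≤ q.length)
    (hnot : ¬ p <+: q) : False := by
  simp [PySem.Chars.startswith, List.isPrefixOf_iff_prefix] at hp hq
  exact hnot (List.prefix_of_prefix_length_le hp hq hlen)

-- inserting at key "app" / "urgency" into the four-key dict rewrites just that slot
lemma pvInsert_app (i s a u : String) (v : String) :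
    ((PySem.Dict.ofList [("id",i),("summary",s),("app",a),("urgency",u)]).insert "app" v)
      = PySem.Dict.ofList [("id",i),("summary",s),("app",v),("urgency",u)] := by
  simp [PySem.Dict.ofList, PySem.Dict.insert, PySem.Dict.update, PySem.Dict.contains, PySem.Dict.empty]

lemma pvInsert_urgency (i s a u : String) (v : String) :
    ((PySem.Dict.ofList [("id",i),("summary",s),("app",a),("urgency",u)]).insert "urgency" v)
      = PySem.Dict.ofList [("id",i),("summary",s),("app",a),("urgency",v)] := by
  simp [PySem.Dict.ofList, PySem.Dict.insert, PySem.Dict.update, PySem.Dict.contains, PySem.Dict.empty]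

lemma pvItems_ofList (i s a u : String) :
    (PySem.Dict.ofList [("id",i),("summary",s),("app",a),("urgency",u)]).items
      = [("id",i),("summary",s),("app",a),("urgency",u)] := by
  simp [PySem.Dict.ofList, PySem.Dict.update, PySem.Dict.insert, PySem.Dict.contains, PySem.Dict.empty]

-- A's dict-mutating field loop computes exactly B's pair-accumulator field loop
lemma pvUpd_step (l : List Char) (i s a u : String) :
    pvUpdA (PySem.Dict.ofList [("id",i),("summary",s),("app",a),("urgency",u)]) l
      = PySem.Dict.ofList [("id",i),("summary",s),
          ("app",(pvFieldStep (a,u) l).1),("urgency",(pvFieldStep (a,u) l).2)] := by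
  unfold pvUpdA pvFieldStep
  cases hd : PySem.Chars.startswith l "  Desktop entry:".toList with
  | true => simp [pvInsert_app]
  | false =>
    cases hu : PySem.Chars.startswith l "  Urgency:".toList with
    | true =>
      have hap : PySem.Chars.startswith l "  App:".toList = false := by
        cases hap : PySem.Chars.startswith l "  App:".toList with
        | false => rfl
        | true => exact (pvPrefix_exclusive hap hu (by decide) (by decide)).elim
      rw [hap]; simp [pvInsert_urgency]
    | false =>
      cases hap : PySem.Chars.startswith l "  App:".toList with
      | true => simp [pvInsert_app]
      | false => simp

lemma pvUpd_fold (tail : List (List Char)) : ∀ (i s a u : String),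
    (tail.foldl pvUpdA (PySem.Dict.ofList [("id",i),("summary",s),("app",a),("urgency",u)]))
      = PySem.Dict.ofList [("id",i),("summary",s),
          ("app",(tail.foldl pvFieldStep (a,u)).1),("urgency",(tail.foldl pvFieldStep (a,u)).2)] := by
  induction tail with
  | nil => intro i s a u; rfl
  | cons l t ih =>
    intro i s a u
    simp only [List.foldl_cons]
    rw [pvUpd_step, ih]

-- the items of A's per-block dict are exactly B's per-block entry
lemma pvCur_items (b : List (List Char)) : (pvCur b).items = pvParseBlock b := by
  unfold pvCur pvParseBlock pvInitA
  rw [pvUpd_fold]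
  rw [pvItems_ofList]

lemma pvCur_append (b : List (List Char)) (hb : b ≠ []) (l : List Char) :
    pvCur (b ++ [l]) = pvUpdA (pvCur b) l := by
  obtain ⟨x, t, rfl⟩ := List.exists_cons_of_ne_nil hb
  simp [pvCur, List.foldl_append]

lemma pvStateOf_concat_header (bs : List (List (List Char))) (l : List Char) :
    pvStateOf (bs ++ [[l]]) = (bs.map pvCur, some (pvInitA l)) := by
  unfold pvStateOf
  rw [List.dropLast_concat, List.getLast?_concat]
  rfl

lemma pvMap_eq_finish (bs : List (List (List Char))) :
    pvFinish (pvStateOf bs) = bs.map pvParseBlock := by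
  rcases Classical.em (bs = []) with rfl | hne
  · rfl
  · unfold pvFinish pvStateOf
    rw [List.getLast?_eq_some_getLast hne]
    simp only [Option.map_some, Option.elim_some]
    rw [show [pvCur (bs.getLast hne)] = List.map pvCur [bs.getLast hne] from rfl,
        ← List.map_append, List.dropLast_append_getLast hne, List.map_map]
    exact List.map_congr_left (fun b _ => pvCur_items b)

-- main invariant: running A's loop from the state of B's blocks equals B's grouping then mapping
lemma pvMain (lines : List (List Char)) : ∀ (bs : List (List (List Char))),
    (∀ b ∈ bs, b ≠ []) →
    pvFinish (lines.foldl pvStepA (pvStateOf bs)) = (lines.foldl pvAddLine bs).map pvParseBlock := by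
  induction lines with
  | nil => intro bs _; exact pvMap_eq_finish bs
  | cons l rest ih =>
    intro bs hbs
    simp only [List.foldl_cons]
    cases hh : PySem.Chars.startswith l "Notification ".toList with
    | true =>
      have hstep : pvStepA (pvStateOf bs) l = pvStateOf (bs ++ [[l]]) := by
        rw [pvStateOf_concat_header]
        unfold pvStepA pvStateOf
        rw [hh]
        simp only [if_true]
        rcases Classical.em (bs = []) with rfl | hne
        · rfl
        · rw [List.getLast?_eq_some_getLast hne]
          simp only [Option.map_some, Option.elim_some]
          rw [show [pvCur (bs.getLast hne)] = List.map pvCur [bs.getLast hne] from rfl,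
              ← List.map_append, List.dropLast_append_getLast hne]
      have haddl : pvAddLine bs l = bs ++ [[l]] := by
        unfold pvAddLine; rw [hh]; simp
      rw [hstep, haddl]
      exact ih (bs ++ [[l]]) (by
        intro b hb
        rcases List.mem_append.mp hb with h | h
        · exact hbs b h
        · simp at h; simp [h])
    | false =>
      rcases Classical.em (bs = []) with rfl | hne
      · have hstep : pvStepA (pvStateOf []) l = pvStateOf [] := by
          unfold pvStepA pvStateOf; rw [hh]; simp
        have haddl : pvAddLine [] l = [] := by
          unfold pvAddLine; rw [hh]; simp
        rw [hstep, haddl]; exact ih [] (by simp)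
      · have hlastne : bs.getLast hne ≠ [] := hbs _ (List.getLast_mem hne)
        have hstep : pvStepA (pvStateOf bs) l
            = pvStateOf (bs.dropLast ++ [bs.getLast hne ++ [l]]) := by
          unfold pvStepA pvStateOf
          rw [List.getLast?_eq_some_getLast hne, hh]
          simp only [Bool.false_eq_true, if_false, Option.map_some,
            List.dropLast_concat, List.getLast?_concat]
          rw [pvCur_append _ hlastne]
        have haddl : pvAddLine bs l = bs.dropLast ++ [bs.getLast hne ++ [l]] := by
          unfold pvAddLine
          rw [hh, List.getLast?_eq_some_getLast hne]
          simp
        rw [hstep, haddl]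
        exact ih _ (by
          intro b hb
          rcases List.mem_append.mp hb with h | h
          · exact hbs b ((List.dropLast_sublist bs).mem h)
          · simp at h; simp [h])

-- ===== VERDICT (by name: the statement is the Claim_ definition above) =====
theorem parse_spec : Claim_equal_parse := by
  intro output _
  unfold Spec_parse parse parse_alt
  rcases Classical.em (output = "") with rfl | hne
  · rfl
  · rw [if_neg hne]
    exact pvMain (PySem.Chars.splitlines output.toList) [] (by simp)
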